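-- pv_equiv track=rewrite | github.com/AlphaLFC/captcha | utils/listutils.py | shrinkstrlist
-- ===== SOURCE A (Python) =====
-- def shrinkstrlist(in_list):
--     '''Shrink a list of str sequence to
--     a list of strings seperated by empty str in the previous sequence.
--
--     # Example
--         in_list = ['', 'a', 'b', 'c', '', 'd']
--         out_list = shrinkstrlist(in_list)
--         out_list -> ['abc', 'd']
--     '''
--     tmp_list = []
--     for i in in_list:
--         if i == '':
--             tmp_list.append(' ')
--         else:
--             tmp_list.append(i)
--     outstr = ''.join(tmp_list)
--     out_list = outstr.strip().split()
--     return out_list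
-- ===== SOURCE B (Python) =====
-- def shrinkstrlist(in_list):
--     out_list = []
--     buf = []
--     for s in in_list:
--         if s == '':
--             if buf:
--                 out_list.extend(''.join(buf).split())
--                 buf = []
--         else:
--             buf.append(s)
--     if buf:
--         out_list.extend(''.join(buf).split())
--     return out_list
-- ===== Notes on version B (the rewrite author's own statement) =====
-- stated objective: alternative
-- what changed: Instead of building one global string (empty markers replaced by spaces) and splitting it once, B makes a single pass that buffers each run of non-empty strings and flushes the joined buffer's whitespace-split tokens into the output at every marker and at the end.
import Mathlib
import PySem

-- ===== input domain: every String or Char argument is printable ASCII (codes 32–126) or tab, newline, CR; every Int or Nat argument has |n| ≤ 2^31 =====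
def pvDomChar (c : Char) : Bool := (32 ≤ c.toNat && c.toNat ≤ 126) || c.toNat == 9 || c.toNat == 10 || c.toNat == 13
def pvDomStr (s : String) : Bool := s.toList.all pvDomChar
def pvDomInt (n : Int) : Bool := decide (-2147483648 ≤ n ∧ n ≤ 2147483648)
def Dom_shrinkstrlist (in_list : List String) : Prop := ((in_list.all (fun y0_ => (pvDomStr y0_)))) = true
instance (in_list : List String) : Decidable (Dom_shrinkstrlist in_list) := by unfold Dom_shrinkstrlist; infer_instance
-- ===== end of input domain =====

-- B replaces A's build-one-global-string-then-split-once with a single buffering pass that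
-- flushes each marker-delimited run's joined tokens into the output (objective: alternative).

-- ===== PORT A =====
def shrinkstrlist (in_list : List String) : List String :=
  let tmp_list := in_list.foldl (fun acc i => if i == "" then acc ++ [" "] else acc ++ [i]) []
  let outstr := PySem.Str.join "" tmp_list
  PySem.Str.split₀ (PySem.Str.strip outstr)

-- ===== PORT B =====
def shrinkstrlist_alt (in_list : List String) : List String :=
  let st := in_list.foldl
    (fun (st : List String × List String) s =>
      if s == "" then
        if st.2.isEmpty then st
        else (st.1 ++ PySem.Str.split₀ (PySem.Str.join "" st.2), [])
      else (st.1, st.2 ++ [s]))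
    ([], [])
  if st.2.isEmpty then st.1 else st.1 ++ PySem.Str.split₀ (PySem.Str.join "" st.2)

-- ===== PRECONDITION & SPEC =====
def Spec_shrinkstrlist (in_list : List String) (out : List String) : Prop := out = shrinkstrlist_alt in_list
instance (in_list : List String) (out : List String) : Decidable (Spec_shrinkstrlist in_list out) := by unfold Spec_shrinkstrlist; infer_instance

-- ===== CLAIM (what is proved, stated in full; the proofs are below) =====
def Claim_equal_shrinkstrlist : Prop := ∀ (in_list : List String), Dom_shrinkstrlist in_list → Spec_shrinkstrlist in_list (shrinkstrlist in_list)

-- ===== LEMMAS AND PROOFS =====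

-- step equations for Python-split's worker
theorem go_cons_space {c : Char} (hc : PySem.Chars.isspace c = true) (t cur : List Char)
    (acc : List (List Char)) :
    PySem.Chars.split₀.go (c :: t) cur acc =
      if cur.isEmpty then PySem.Chars.split₀.go t [] acc
      else PySem.Chars.split₀.go t [] (cur.reverse :: acc) := by
  simp [PySem.Chars.split₀.go, hc]

theorem go_cons_nonspace {c : Char} (hc : PySem.Chars.isspace c = false) (t cur : List Char)
    (acc : List (List Char)) :
    PySem.Chars.split₀.go (c :: t) cur acc = PySem.Chars.split₀.go t (c :: cur) acc := by
  simp [PySem.Chars.split₀.go, hc]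

theorem go_nil (cur : List Char) (acc : List (List Char)) :
    PySem.Chars.split₀.go [] cur acc =
      if cur.isEmpty then acc.reverse else (cur.reverse :: acc).reverse := by
  simp [PySem.Chars.split₀.go]

-- accumulator lemma
theorem go_acc (s : List Char) (cur : List Char) (acc : List (List Char)) :
    PySem.Chars.split₀.go s cur acc = acc.reverse ++ PySem.Chars.split₀.go s cur [] := by
  induction s generalizing cur acc with
  | nil => rw [go_nil, go_nil]; split_ifs <;> simp
  | cons c rest ih =>
      by_cases hc : PySem.Chars.isspace c = true
      · rw [go_cons_space hc, go_cons_space hc]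
        by_cases hcur : cur.isEmpty = true
        · rw [if_pos hcur, if_pos hcur]; exact ih [] acc
        · rw [if_neg hcur, if_neg hcur, ih [] (cur.reverse :: acc), ih [] [cur.reverse]]
          simp
      · rw [go_cons_nonspace (eq_false_of_ne_true hc), go_cons_nonspace (eq_false_of_ne_true hc)]
        exact ih (c :: cur) acc

-- splitting at a space separator
theorem go_space_split (s t : List Char) (cur : List Char) (acc : List (List Char)) :
    PySem.Chars.split₀.go (s ++ ' ' :: t) cur acc =
      PySem.Chars.split₀.go s cur acc ++ PySem.Chars.split₀.go t [] [] := by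
  induction s generalizing cur acc with
  | nil =>
      rw [List.nil_append, go_cons_space (by decide), go_nil]
      by_cases hcur : cur.isEmpty = true
      · rw [if_pos hcur, if_pos hcur, go_acc t [] acc]
      · rw [if_neg hcur, if_neg hcur, go_acc t [] (cur.reverse :: acc)]
  | cons c rest ih =>
      rw [List.cons_append]
      by_cases hc : PySem.Chars.isspace c = true
      · rw [go_cons_space hc, go_cons_space hc]
        by_cases hcur : cur.isEmpty = true
        · rw [if_pos hcur, if_pos hcur]; exact ih [] acc
        · rw [if_neg hcur, if_neg hcur]; exact ih [] (cur.reverse :: acc)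
      · rw [go_cons_nonspace (eq_false_of_ne_true hc), go_cons_nonspace (eq_false_of_ne_true hc)]
        exact ih (c :: cur) acc

theorem split₀_space_cons (s t : List Char) :
    PySem.Chars.split₀ (s ++ ' ' :: t) = PySem.Chars.split₀ s ++ PySem.Chars.split₀ t := by
  simpa [PySem.Chars.split₀] using go_space_split s t [] []

-- all-whitespace input yields nothing
theorem go_allspace (t : List Char) (h : ∀ c ∈ t, PySem.Chars.isspace c = true)
    (acc : List (List Char)) : PySem.Chars.split₀.go t [] acc = acc.reverse := by
  induction t generalizing acc with
  | nil => simp [go_nil]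
  | cons c rest ih =>
      rw [go_cons_space (h c (by simp)), if_pos List.isEmpty_nil]
      exact ih (fun x hx => h x (by simp [hx])) acc

-- all-whitespace suffixes are ignored
theorem go_append_allspace (s t : List Char) (h : ∀ c ∈ t, PySem.Chars.isspace c = true)
    (cur : List Char) (acc : List (List Char)) :
    PySem.Chars.split₀.go (s ++ t) cur acc = PySem.Chars.split₀.go s cur acc := by
  induction s generalizing cur acc with
  | nil =>
      cases t with
      | nil => simp
      | cons c rest =>
          rw [List.nil_append, go_cons_space (h c (by simp)), go_nil]
          by_cases hcur : cur.isEmpty = true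
          · rw [if_pos hcur, if_pos hcur, go_allspace rest (fun x hx => h x (by simp [hx])) acc]
          · rw [if_neg hcur, if_neg hcur, go_allspace rest (fun x hx => h x (by simp [hx]))]
  | cons c rest ih =>
      rw [List.cons_append]
      by_cases hc : PySem.Chars.isspace c = true
      · rw [go_cons_space hc, go_cons_space hc]
        by_cases hcur : cur.isEmpty = true
        · rw [if_pos hcur, if_pos hcur]; exact ih [] acc
        · rw [if_neg hcur, if_neg hcur]; exact ih [] (cur.reverse :: acc)
      · rw [go_cons_nonspace (eq_false_of_ne_true hc), go_cons_nonspace (eq_false_of_ne_true hc)]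
        exact ih (c :: cur) acc

-- all-whitespace prefixes are ignored
theorem go_allspace_prefix (t s : List Char) (h : ∀ c ∈ t, PySem.Chars.isspace c = true)
    (acc : List (List Char)) :
    PySem.Chars.split₀.go (t ++ s) [] acc = PySem.Chars.split₀.go s [] acc := by
  induction t with
  | nil => simp
  | cons c rest ih =>
      rw [List.cons_append, go_cons_space (h c (by simp)), if_pos List.isEmpty_nil]
      exact ih (fun x hx => h x (by simp [hx]))

-- Python split() ignores strip()
theorem split₀_strip (s : List Char) :
    PySem.Chars.split₀ (PySem.Chars.strip s) = PySem.Chars.split₀ s := by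
  have h1 : ∀ u : List Char,
      PySem.Chars.split₀ (PySem.Chars.rstrip u) = PySem.Chars.split₀ u := by
    intro u
    conv_rhs => rw [show u = (u.reverse.dropWhile PySem.Chars.isspace).reverse ++
        (u.reverse.takeWhile PySem.Chars.isspace).reverse from by
      rw [← List.reverse_append, List.takeWhile_append_dropWhile, List.reverse_reverse]]
    unfold PySem.Chars.rstrip PySem.Chars.split₀
    rw [go_append_allspace]
    intro c hc
    exact List.mem_takeWhile_imp (List.mem_reverse.mp hc)
  have h2 : PySem.Chars.split₀ (PySem.Chars.lstrip s) = PySem.Chars.split₀ s := by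
    conv_rhs => rw [show s = s.takeWhile PySem.Chars.isspace ++ s.dropWhile PySem.Chars.isspace
      from (List.takeWhile_append_dropWhile).symm]
    unfold PySem.Chars.lstrip PySem.Chars.split₀
    rw [go_allspace_prefix]
    intro c hc
    exact List.mem_takeWhile_imp hc
  rw [PySem.Chars.strip, h1, h2]

-- ''.join is flatten at the char level
theorem flatten_intersperse_nil (l : List (List Char)) :
    (List.intersperse ([] : List Char) l).flatten = l.flatten := by
  induction l with
  | nil => rfl
  | cons p r ih =>
      cases r with
      | nil => rfl
      | cons q t =>
          simp only [List.intersperse_cons₂, List.flatten_cons] at ih ⊢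
          simp [ih]

theorem join_nil_sep (parts : List (List Char)) :
    PySem.Chars.join [] parts = parts.flatten := by
  simp [PySem.Chars.join, List.intercalate, flatten_intersperse_nil]

-- the chars of a run buffer
def csum (l : List String) : List Char := (l.map String.toList).flatten

def fA (i : String) : String := if i == "" then " " else i

theorem flush_chars (buf : List String) :
    PySem.Str.split₀ (PySem.Str.join "" buf) =
      (PySem.Chars.split₀ (csum buf)).map String.ofList := by
  have h0 : ("" : String).toList = [] := by simp
  simp [PySem.Str.split₀, PySem.Str.toList_join, h0, csum, join_nil_sep]

theorem split₀_nil : PySem.Chars.split₀ [] = [] := by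
  simp [PySem.Chars.split₀, go_nil]

-- B's loop invariant
theorem alt_loop_inv (rest : List String) (out buf : List String) :
    (let st := rest.foldl
        (fun (st : List String × List String) s =>
          if s == "" then
            if st.2.isEmpty then st
            else (st.1 ++ PySem.Str.split₀ (PySem.Str.join "" st.2), [])
          else (st.1, st.2 ++ [s]))
        (out, buf)
      if st.2.isEmpty then st.1 else st.1 ++ PySem.Str.split₀ (PySem.Str.join "" st.2)) =
    out ++ (PySem.Chars.split₀ (csum buf ++ csum (rest.map fA))).map String.ofList := by
  induction rest generalizing out buf with
  | nil =>
      simp only [List.foldl_nil, List.map_nil]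
      by_cases hb : buf.isEmpty = true
      · have hbe : buf = [] := List.isEmpty_iff.mp hb
        subst hbe
        simp [csum, split₀_nil]
      · simp [hb, flush_chars, csum]
  | cons s rest ih =>
      simp only [List.foldl_cons, List.map_cons]
      by_cases hs : s = ""
      · subst hs
        have hfa : csum (fA "" :: rest.map fA) = ' ' :: csum (rest.map fA) := by
          simp [csum, fA]
        rw [hfa]
        have hsplit : PySem.Chars.split₀ (csum buf ++ ' ' :: csum (rest.map fA)) =
            PySem.Chars.split₀ (csum buf) ++ PySem.Chars.split₀ (csum (rest.map fA)) :=
          split₀_space_cons _ _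
        simp only [beq_self_eq_true, if_true]
        by_cases hb : buf.isEmpty = true
        · have hbe : buf = [] := List.isEmpty_iff.mp hb
          subst hbe
          rw [if_pos List.isEmpty_nil, ih]
          rw [hsplit]
          simp [csum, split₀_nil]
        · rw [if_neg hb, ih]
          rw [hsplit, flush_chars]
          simp [csum]
      · have hbeq : (s == "") = false := by simpa using hs
        rw [hbeq]
        simp only [Bool.false_eq_true, if_false]
        rw [ih]
        have h1 : csum (buf ++ [s]) = csum buf ++ s.toList := by simp [csum]
        have h2 : csum (fA s :: rest.map fA) = s.toList ++ csum (rest.map fA) := by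
          simp [csum, fA, hs]
        rw [h1, h2]
        simp

-- A's append loop is a map
theorem a_fold_map (in_list : List String) :
    in_list.foldl (fun acc i => if i == "" then acc ++ [" "] else acc ++ [i]) [] =
      in_list.map fA := by
  have hstep : ∀ (acc : List String), ∀ i ∈ in_list,
      (if i == "" then acc ++ [" "] else acc ++ [i]) = acc ++ [fA i] := by
    intro acc i _
    by_cases h : i = "" <;> simp [fA, h]
  calc in_list.foldl (fun acc i => if i == "" then acc ++ [" "] else acc ++ [i]) []
      = in_list.foldl (fun acc i => acc ++ [fA i]) [] :=
        PySem.List.foldl_congr_mem _ _ _ _ hstep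
    _ = in_list.map fA := by
        simpa using PySem.List.foldl_append_singleton_eq_map (l := in_list) (f := fA) (acc := [])

-- ===== VERDICT (by name: the statement is the Claim_ definition above) =====
theorem shrinkstrlist_spec : Claim_equal_shrinkstrlist := by
  intro in_list _
  unfold Spec_shrinkstrlist shrinkstrlist shrinkstrlist_alt
  rw [a_fold_map]
  rw [alt_loop_inv in_list [] []]
  simp only [PySem.Str.split₀, PySem.Str.toList_strip, PySem.Str.toList_join, split₀_strip]
  have h0 : ("" : String).toList = [] := by simp
  rw [h0, join_nil_sep]
  simp [csum]
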